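-- pv_equiv track=rewrite | github.com/tomereldor/NuriTomer | biotech_catalyst_v3/scripts/backfill_event_links.py | _pick_best_url
-- ===== SOURCE A (Python) =====
-- _TIERS = [
--     # Tier 1 — official PR wires
--     (1, ["businesswire.com", "globenewswire.com", "prnewswire.com"]),
--     # Tier 2 — regulatory / SEC
--     (2, ["sec.gov", "fda.gov", "ema.europa.eu"]),
--     # Tier 3 — IR sites, CT.gov, journals
--     (3, ["clinicaltrials.gov", "pubmed.ncbi", "nejm.org", "nature.com",
--          "ir.", "investor.", "newsroom.", "clinicaltrialresults"]),
--     # Tier 4 — reputable biotech / financial news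
--     (4, ["biospace.com", "fiercebiotech.com", "statnews.com", "endpoints.news",
--          "reuters.com", "bloomberg.com", "wsj.com", "seekingalpha.com"]),
-- ]
--
-- _SKIP_DOMAINS = [
--     "google.com", "bing.com", "yahoo.com",
--     "twitter.com", "x.com", "reddit.com", "wikipedia.org",
-- ]
--
-- def _url_tier(url: str) -> int:
--     u = url.lower()
--     for tier, domains in _TIERS:
--         if any(d in u for d in domains):
--             return tier
--     return 99
--
-- def _pick_best_url(content_url: str, citations: list) -> str:
--     """Return the highest-tier URL from content + all citations."""
--     candidates = []
--     if content_url and content_url.startswith("http"):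
--         candidates.append(content_url)
--     for c in citations:
--         if isinstance(c, str) and c.startswith("http"):
--             candidates.append(c)
--
--     # Remove junk domains
--     candidates = [u for u in candidates if not any(s in u.lower() for s in _SKIP_DOMAINS)]
--     if not candidates:
--         return ""
--
--     # Sort by (tier, url_length) — shortest URL at same tier is usually cleaner
--     return min(candidates, key=lambda u: (_url_tier(u), len(u)))
-- ===== SOURCE B (Python) =====
-- _TIERS = [
--     (1, ["businesswire.com", "globenewswire.com", "prnewswire.com"]),
--     (2, ["sec.gov", "fda.gov", "ema.europa.eu"]),
--     (3, ["clinicaltrials.gov", "pubmed.ncbi", "nejm.org", "nature.com",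
--          "ir.", "investor.", "newsroom.", "clinicaltrialresults"]),
--     (4, ["biospace.com", "fiercebiotech.com", "statnews.com", "endpoints.news",
--          "reuters.com", "bloomberg.com", "wsj.com", "seekingalpha.com"]),
-- ]
--
-- _SKIP_DOMAINS = [
--     "google.com", "bing.com", "yahoo.com",
--     "twitter.com", "x.com", "reddit.com", "wikipedia.org",
-- ]
--
-- # Tiers in priority order, with 99 as the fallback for unknown domains.
-- _TIER_ORDER = [t for t, _ in _TIERS] + [99]
--
--
-- def _url_tier(url: str) -> int:
--     u = url.lower()
--     for tier, domains in _TIERS: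
--         if any(d in u for d in domains):
--             return tier
--     return 99
--
--
-- def _pick_best_url(content_url: str, citations: list) -> str:
--     """Return the highest-tier URL from content + all citations."""
--     candidates = []
--     if content_url and content_url.startswith("http"):
--         candidates.append(content_url)
--     for c in citations:
--         if isinstance(c, str) and c.startswith("http"):
--             candidates.append(c)
--
--     candidates = [u for u in candidates if not any(s in u.lower() for s in _SKIP_DOMAINS)]
--
--     # Best tier first; within a tier the shortest URL (earliest on ties).
--     for tier in _TIER_ORDER:
--         bucket = [u for u in candidates if _url_tier(u) == tier]
--         if bucket:
--             return min(bucket, key=len)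
--     return ""
-- ===== Notes on version B (the rewrite author's own statement) =====
-- stated objective: alternative
-- what changed: Replaces the single min over the lexicographic key (tier, length) with a loop over the tier table in priority order (1,2,3,4 then fallback 99) that filters the candidates into the current tier's bucket and returns the shortest URL of the first non-empty bucket.
import Mathlib
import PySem

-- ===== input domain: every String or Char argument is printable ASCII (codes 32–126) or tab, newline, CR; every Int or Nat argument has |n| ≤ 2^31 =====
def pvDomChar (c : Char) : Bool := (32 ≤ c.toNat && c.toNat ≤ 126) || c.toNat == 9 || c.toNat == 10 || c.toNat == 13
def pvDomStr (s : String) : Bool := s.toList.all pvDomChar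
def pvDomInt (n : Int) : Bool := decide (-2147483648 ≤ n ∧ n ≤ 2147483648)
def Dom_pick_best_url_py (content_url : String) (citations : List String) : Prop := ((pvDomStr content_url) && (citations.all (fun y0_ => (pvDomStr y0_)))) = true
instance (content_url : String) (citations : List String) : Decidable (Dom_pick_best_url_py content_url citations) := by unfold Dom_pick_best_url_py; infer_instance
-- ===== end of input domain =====

-- B changes the selection step only: instead of one min over the lexicographic key
-- (tier, length), it scans the tiers in priority order and returns the shortest URL of
-- the first non-empty tier bucket (objective: alternative decomposition, same cost).

-- ===== PORT A =====
def pvTiers : List (Int × List String) :=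
  [(1, ["businesswire.com", "globenewswire.com", "prnewswire.com"]),
   (2, ["sec.gov", "fda.gov", "ema.europa.eu"]),
   (3, ["clinicaltrials.gov", "pubmed.ncbi", "nejm.org", "nature.com",
        "ir.", "investor.", "newsroom.", "clinicaltrialresults"]),
   (4, ["biospace.com", "fiercebiotech.com", "statnews.com", "endpoints.news",
        "reuters.com", "bloomberg.com", "wsj.com", "seekingalpha.com"])]

def pvSkipDomains : List String :=
  ["google.com", "bing.com", "yahoo.com",
   "twitter.com", "x.com", "reddit.com", "wikipedia.org"]

-- the 'for tier, domains in _TIERS' loop with early return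
def urlTierGo (u : String) : List (Int × List String) → Int
  | [] => 99
  | (tier, domains) :: rest =>
      if domains.any (fun d => PySem.Str.isIn d u) then tier else urlTierGo u rest

def url_tier (url : String) : Int := urlTierGo (PySem.Str.lower url) pvTiers

def pvLen (u : String) : Int := (PySem.Str.len u : Int)

-- candidate collection + junk-domain filter, shared text of both Pythons
def pvCandidatesA (content_url : String) (citations : List String) : List String :=
  let candidates := if (!(content_url == "") && PySem.Str.startswith content_url "http")
                    then ([] : List String) ++ [content_url] else []
  let candidates := citations.foldl
    (fun acc c => if PySem.Str.startswith c "http" then acc ++ [c] else acc) candidates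
  candidates.filter (fun u => !(pvSkipDomains.any (fun s => PySem.Str.isIn s (PySem.Str.lower u))))

def pick_best_url_py (content_url : String) (citations : List String) : String :=
  let candidates := pvCandidatesA content_url citations
  if candidates.isEmpty then ""
  else (PySem.List.min2? candidates (fun u => url_tier u) (fun u => pvLen u)).getD ""

-- ===== PORT B =====
-- identical collection code in Source B, transcribed once more
def pvCandidatesB (content_url : String) (citations : List String) : List String :=
  let candidates := if (!(content_url == "") && PySem.Str.startswith content_url "http")
                    then ([] : List String) ++ [content_url] else []
  let candidates := citations.foldl
    (fun acc c => if PySem.Str.startswith c "http" then acc ++ [c] else acc) candidates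
  candidates.filter (fun u => !(pvSkipDomains.any (fun s => PySem.Str.isIn s (PySem.Str.lower u))))

def pvTierOrder : List Int := pvTiers.map Prod.fst ++ [99]

-- the 'for tier in _TIER_ORDER' loop with early return
def pickTierGo (candidates : List String) : List Int → String
  | [] => ""
  | t :: rest =>
      let bucket := candidates.filter (fun u => url_tier u == t)
      if bucket.isEmpty then pickTierGo candidates rest
      else (PySem.List.min? bucket (fun u => pvLen u)).getD ""

def pick_best_url_py_alt (content_url : String) (citations : List String) : String :=
  pickTierGo (pvCandidatesB content_url citations) pvTierOrder

-- ===== PRECONDITION & SPEC =====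
def Spec_pick_best_url_py (content_url : String) (citations : List String) (out : String) : Prop := out = pick_best_url_py_alt content_url citations
instance (content_url : String) (citations : List String) (out : String) : Decidable (Spec_pick_best_url_py content_url citations out) := by unfold Spec_pick_best_url_py; infer_instance

-- ===== CLAIM (what is proved, stated in full; the proofs are below) =====
def Claim_equal_pick_best_url_py : Prop := ∀ (content_url : String) (citations : List String), Dom_pick_best_url_py content_url citations → Spec_pick_best_url_py content_url citations (pick_best_url_py content_url citations)

-- ===== LEMMAS AND PROOFS =====

-- the fold step of min2? with key (url_tier, pvLen)
def pvStepA (acc : Option String) (x : String) : Option String :=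
  match acc with
  | none => some x
  | some m =>
      if (decide (url_tier x < url_tier m) ||
          !decide (url_tier m < url_tier x) && decide (pvLen x < pvLen m)) = true
      then some x else some m

-- the fold step of min? with key pvLen
def pvStepB (acc : Option String) (x : String) : Option String :=
  match acc with
  | none => some x
  | some m => if pvLen x < pvLen m then some x else some m

lemma min2?_eq_foldl (l : List String) :
    PySem.List.min2? l (fun u => url_tier u) (fun u => pvLen u) = l.foldl pvStepA none := by
  unfold PySem.List.min2?
  congr 1
  funext acc x
  cases acc <;> rfl

lemma min?_eq_foldl (l : List String) :
    PySem.List.min? l (fun u => pvLen u) = l.foldl pvStepB none := by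
  unfold PySem.List.min?
  congr 1
  funext acc x
  cases acc <;> rfl

-- relation between the min2? accumulator over the whole list and the min? accumulator
-- over the tier-t bucket
def pvRel (t : Int) (acc2 acc : Option String) : Prop :=
  (acc = none ∧ (acc2 = none ∨ ∃ m, acc2 = some m ∧ t < url_tier m)) ∨
  (∃ m, acc = some m ∧ acc2 = some m ∧ url_tier m = t)

lemma fold_rel (t : Int) :
    ∀ (l : List String) (acc2 acc : Option String),
      (∀ x ∈ l, t ≤ url_tier x) → pvRel t acc2 acc →
      pvRel t (l.foldl pvStepA acc2) ((l.filter (fun u => url_tier u == t)).foldl pvStepB acc) := by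
  intro l
  induction l with
  | nil => intro acc2 acc _ h; simpa using h
  | cons x xs ih =>
    intro acc2 acc hle hrel
    have hxle : t ≤ url_tier x := hle x (List.mem_cons_self ..)
    have hxs : ∀ y ∈ xs, t ≤ url_tier y := fun y hy => hle y (List.mem_cons_of_mem _ hy)
    by_cases hx : url_tier x = t
    · -- x is in the bucket
      simp only [List.foldl_cons, List.filter_cons, hx, beq_self_eq_true, if_pos]
      apply ih _ _ hxs
      rcases hrel with ⟨hA, hB⟩ | ⟨m, hm, hm2, hmt⟩
      · rcases hB with h2 | ⟨m, hm2, hmt⟩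
        · right; exact ⟨x, by simp [hA, pvStepB], by simp [h2, pvStepA], hx⟩
        · right
          refine ⟨x, by simp [hA, pvStepB], ?_, hx⟩
          have : url_tier x < url_tier m := by omega
          simp [hm2, pvStepA, this]
      · -- both accumulators hold the same m with tier t
        right
        by_cases hlen : pvLen x < pvLen m
        · refine ⟨x, by simp [hm, pvStepB, hlen], ?_, hx⟩
          have h1 : ¬ url_tier x < url_tier m := by omega
          have h2 : ¬ url_tier m < url_tier x := by omega
          simp [hm2, pvStepA, h1, h2, hlen]
        · refine ⟨m, by simp [hm, pvStepB, hlen], ?_, hmt⟩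
          have h1 : ¬ url_tier x < url_tier m := by omega
          have h2 : ¬ url_tier m < url_tier x := by omega
          simp [hm2, pvStepA, h1, h2, hlen]
    · -- x is outside the bucket: t < url_tier x
      have hxt : t < url_tier x := lt_of_le_of_ne hxle (fun h => hx h.symm)
      have hfilter : (url_tier x == t) = false := by simp [hx]
      simp only [List.foldl_cons, List.filter_cons, hfilter, if_neg, Bool.false_eq_true,
        not_false_iff]
      apply ih _ _ hxs
      rcases hrel with ⟨hA, hB⟩ | ⟨m, hm, hm2, hmt⟩
      · left
        refine ⟨hA, ?_⟩
        rcases hB with h2 | ⟨m, hm2, hmt⟩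
        · exact Or.inr ⟨x, by simp [h2, pvStepA], hxt⟩
        · right
          simp only [hm2, pvStepA]
          split
          · exact ⟨x, rfl, hxt⟩
          · exact ⟨m, rfl, hmt⟩
      · right
        refine ⟨m, hm, ?_, hmt⟩
        have h1 : ¬ url_tier x < url_tier m := by omega
        have h2 : url_tier m < url_tier x := by omega
        simp [hm2, pvStepA, h1, h2]

-- if t is a lower bound of all tiers in l and the tier-t bucket is non-empty,
-- the lexicographic min over l is the length-min over the bucket
lemma min2?_restrict (t : Int) (l : List String)
    (hle : ∀ x ∈ l, t ≤ url_tier x)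
    (hne : l.filter (fun u => url_tier u == t) ≠ []) :
    PySem.List.min2? l (fun u => url_tier u) (fun u => pvLen u)
      = PySem.List.min? (l.filter (fun u => url_tier u == t)) (fun u => pvLen u) := by
  have h := fold_rel t l none none hle (Or.inl ⟨rfl, Or.inl rfl⟩)
  rw [min2?_eq_foldl, min?_eq_foldl]
  rcases h with ⟨hA, _⟩ | ⟨m, hm, hm2, _⟩
  · exfalso
    apply hne
    have := PySem.List.min?_eq_none_iff (xs := l.filter (fun u => url_tier u == t))
      (key := fun u => pvLen u)
    rw [min?_eq_foldl] at this
    exact this.mp hA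
  · rw [hm, hm2]

lemma urlTierGo_mem (u : String) :
    ∀ ts : List (Int × List String), urlTierGo u ts ∈ ts.map Prod.fst ++ [99] := by
  intro ts
  induction ts with
  | nil => simp [urlTierGo]
  | cons p rest ih =>
    obtain ⟨tier, domains⟩ := p
    simp only [urlTierGo]
    split
    · simp
    · simp only [List.map_cons, List.cons_append, List.mem_cons]
      exact Or.inr ih

lemma url_tier_mem (u : String) : url_tier u ∈ pvTierOrder :=
  urlTierGo_mem (PySem.Str.lower u) pvTiers

lemma pickTierGo_eq :
    ∀ (T : List Int) (l : List String),
      T.Pairwise (· ≤ ·) → (∀ u ∈ l, url_tier u ∈ T) →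
      pickTierGo l T
        = (PySem.List.min2? l (fun u => url_tier u) (fun u => pvLen u)).getD "" := by
  intro T
  induction T with
  | nil =>
    intro l _ hmem
    have : l = [] := by
      cases l with
      | nil => rfl
      | cons x xs => exact absurd (hmem x (List.mem_cons_self ..)) (by simp)
    subst this
    rfl
  | cons t ts ih =>
    intro l hsort hmem
    have hts : ts.Pairwise (· ≤ ·) := hsort.of_cons
    have hhead : ∀ s ∈ ts, t ≤ s := fun s hs => List.rel_of_pairwise_cons hsort hs
    simp only [pickTierGo]
    by_cases hb : (l.filter (fun u => url_tier u == t)).isEmpty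
    · rw [if_pos hb]
      apply ih l hts
      intro u hu
      have h0 := hmem u hu
      have hne : url_tier u ≠ t := by
        intro h
        have : u ∈ l.filter (fun u => url_tier u == t) := by
          simp [List.mem_filter, hu, h]
        rw [List.isEmpty_iff] at hb
        simp [hb] at this
      rcases List.mem_cons.mp h0 with h | h
      · exact absurd h hne
      · exact h
    · rw [if_neg hb]
      have hne : l.filter (fun u => url_tier u == t) ≠ [] := by
        intro h; rw [h] at hb; exact hb rfl
      have hle : ∀ x ∈ l, t ≤ url_tier x := by
        intro x hx
        rcases List.mem_cons.mp (hmem x hx) with h | h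
        · omega
        · exact hhead _ h
      rw [min2?_restrict t l hle hne]

lemma pvTierOrder_sorted : pvTierOrder.Pairwise (· ≤ ·) := by decide

-- ===== VERDICT (by name: the statement is the Claim_ definition above) =====
theorem pick_best_url_py_spec : Claim_equal_pick_best_url_py := by
  intro content_url citations _
  unfold Spec_pick_best_url_py pick_best_url_py pick_best_url_py_alt
  have hcand : pvCandidatesB content_url citations = pvCandidatesA content_url citations := rfl
  rw [hcand]
  set l := pvCandidatesA content_url citations with hl
  rw [pickTierGo_eq pvTierOrder l pvTierOrder_sorted (fun u _ => url_tier_mem u)]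
  by_cases h : l.isEmpty
  · rw [if_pos h]
    rw [List.isEmpty_iff] at h
    simp [h, PySem.List.min2?]
  · rw [if_neg h]
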